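-- pv_equiv track=rewrite | github.com/Relativity74205/adventofcode2020 | puzzle19b.py | check_message
-- ===== SOURCE A (Python) =====
-- from typing import Dict, Set
--
-- def check_message(m: str, rule42: Set, rule31: Set, message_part_length: int) -> bool:
--     message_parts_class = []
--     for message_index in range(0, len(m), message_part_length):
--         message_part = m[message_index: message_index + message_part_length]
--         if message_part in rule42:
--             message_parts_class.append('r42')
--         elif message_part in rule31:
--             message_parts_class.append('r31')
--         else:
--             return False
--
--     message_parts_class_sorted = sorted(message_parts_class, reverse=True)
--     cnt_r42 = len([ele for ele in message_parts_class if ele == 'r42'])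
--     cnt_r31 = len([ele for ele in message_parts_class if ele == 'r31'])
--     if message_parts_class_sorted == message_parts_class and message_parts_class[-1] == 'r31' and cnt_r42 > cnt_r31:
--         return True
--     else:
--         return False
-- ===== SOURCE B (Python) =====
-- def check_message(m: str, rule42, rule31, message_part_length: int) -> bool:
--     cnt42 = 0
--     cnt31 = 0
--     for i in range(0, len(m), message_part_length):
--         part = m[i: i + message_part_length]
--         if part in rule42:
--             if cnt31 > 0:
--                 return False
--             cnt42 += 1
--         elif part in rule31:
--             cnt31 += 1
--         else:
--             return False
--     return cnt31 > 0 and cnt42 > cnt31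
-- ===== Notes on version B (the rewrite author's own statement) =====
-- stated objective: simpler
-- what changed: B replaces A's build-tag-list / reverse-sort / compare / two count-comprehensions / negative-index pipeline with a single counting pass that rejects as soon as an r42 block follows an r31 block and finally checks cnt31 > 0 and cnt42 > cnt31.
import Mathlib
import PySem

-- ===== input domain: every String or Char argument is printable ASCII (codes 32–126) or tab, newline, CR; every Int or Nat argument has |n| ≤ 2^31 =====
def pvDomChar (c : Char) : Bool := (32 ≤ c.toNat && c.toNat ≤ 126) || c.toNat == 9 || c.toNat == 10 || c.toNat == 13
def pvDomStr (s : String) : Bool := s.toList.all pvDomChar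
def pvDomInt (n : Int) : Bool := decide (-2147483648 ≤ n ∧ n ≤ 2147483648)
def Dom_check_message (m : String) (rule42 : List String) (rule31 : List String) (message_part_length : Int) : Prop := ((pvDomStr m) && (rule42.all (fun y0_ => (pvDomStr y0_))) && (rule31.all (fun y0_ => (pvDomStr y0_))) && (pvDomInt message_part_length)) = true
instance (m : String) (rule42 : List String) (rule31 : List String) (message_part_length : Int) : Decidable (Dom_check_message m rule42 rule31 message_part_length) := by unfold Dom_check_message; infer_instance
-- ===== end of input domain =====

-- B replaces A's tag-list / reverse-sort / count-comprehensions pipeline by one counting pass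
-- (return-value equivalence; neither version mutates its arguments).

-- ===== PORT A =====
-- A's classification loop: builds the list of 'r42'/'r31' tags, none = the loop's 'return False'.
def pvLoopA (m : String) (rule42 rule31 : List String) (L : Int) :
    List Int → List String → Option (List String)
  | [], acc => some acc
  | i :: rest, acc =>
      let part := PySem.Str.slice m (some i) (some (i + L))
      if part ∈ rule42 then pvLoopA m rule42 rule31 L rest (acc ++ ["r42"])
      else if part ∈ rule31 then pvLoopA m rule42 rule31 L rest (acc ++ ["r31"])
      else none

-- A's final check after the loop; tags[-1] is pyGet? (none — the empty-list IndexError — is excluded by Pre_).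
def pvCheckA (tags : List String) : Bool :=
  let sortedTags := PySem.List.sorted tags (fun x => x) true
  let cnt42 : Int := ((tags.filter (fun ele => ele == "r42")).length : Int)
  let cnt31 : Int := ((tags.filter (fun ele => ele == "r31")).length : Int)
  if sortedTags = tags ∧ PySem.List.pyGet? tags (-1) = some "r31" ∧ cnt42 > cnt31 then true else false

def check_message (m : String) (rule42 : List String) (rule31 : List String) (message_part_length : Int) : Bool :=
  match pvLoopA m rule42 rule31 message_part_length
      (PySem.List.pyRange 0 (PySem.Str.len m) message_part_length) [] with
  | none => false
  | some tags => pvCheckA tags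

-- ===== PORT B =====
-- B's single pass: counts r42/r31 parts, fails fast on an unknown part or an r42 after an r31.
def pvLoopB (m : String) (rule42 rule31 : List String) (L : Int) :
    List Int → Int → Int → Bool
  | [], cnt42, cnt31 => decide (0 < cnt31 ∧ cnt31 < cnt42)
  | i :: rest, cnt42, cnt31 =>
      let part := PySem.Str.slice m (some i) (some (i + L))
      if part ∈ rule42 then
        if 0 < cnt31 then false else pvLoopB m rule42 rule31 L rest (cnt42 + 1) cnt31
      else if part ∈ rule31 then pvLoopB m rule42 rule31 L rest cnt42 (cnt31 + 1)
      else false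

def check_message_alt (m : String) (rule42 : List String) (rule31 : List String) (message_part_length : Int) : Bool :=
  pvLoopB m rule42 rule31 message_part_length
    (PySem.List.pyRange 0 (PySem.Str.len m) message_part_length) 0 0

-- ===== PRECONDITION & SPEC =====
-- Pre_ excludes exactly the inputs on which Python A raises: message_part_length = 0 (range ValueError)
-- and empty m or negative message_part_length (no message parts, so message_parts_class[-1] IndexError).
def Pre_check_message (m : String) (rule42 : List String) (rule31 : List String) (message_part_length : Int) : Prop :=
  m ≠ "" ∧ 0 < message_part_length
instance (m : String) (rule42 : List String) (rule31 : List String) (message_part_length : Int) : Decidable (Pre_check_message m rule42 rule31 message_part_length) := by unfold Pre_check_message; infer_instance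

def pvWitness_check_message : String × List String × List String × Int := ("abcd", ["ab"], ["cd"], 2)

def Spec_check_message (m : String) (rule42 : List String) (rule31 : List String) (message_part_length : Int) (out : Bool) : Prop := out = check_message_alt m rule42 rule31 message_part_length
instance (m : String) (rule42 : List String) (rule31 : List String) (message_part_length : Int) (out : Bool) : Decidable (Spec_check_message m rule42 rule31 message_part_length out) := by unfold Spec_check_message; infer_instance

-- ===== CLAIM (what is proved, stated in full; the proofs are below) =====
def Claim_equal_check_message : Prop := ∀ (m : String) (rule42 : List String) (rule31 : List String) (message_part_length : Int), Dom_check_message m rule42 rule31 message_part_length → Pre_check_message m rule42 rule31 message_part_length → Spec_check_message m rule42 rule31 message_part_length (check_message m rule42 rule31 message_part_length)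

-- ===== LEMMAS AND PROOFS =====

-- applying pvCheckA after the loop, with 'none' (the early return False) mapped to false
def pvPost (o : Option (List String)) : Bool :=
  match o with
  | none => false
  | some tags => pvCheckA tags

-- a good accumulator: a r42's followed by b r31's
def pvAcc (a b : Nat) : List String :=
  List.replicate a "r42" ++ List.replicate b "r31"

lemma pvAcc_sorted (a b : Nat) :
    PySem.List.sorted (pvAcc a b) (fun x => x) true = pvAcc a b := by
  apply PySem.List.sorted_rev_eq_self_of_pairwise
  unfold pvAcc
  rw [List.pairwise_append]
  refine ⟨?_, ?_, ?_⟩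
  · exact List.pairwise_replicate.mpr (Or.inr le_rfl)
  · exact List.pairwise_replicate.mpr (Or.inr le_rfl)
  · intro x hx y hy
    rw [List.eq_of_mem_replicate hx, List.eq_of_mem_replicate hy, String.le_iff_toList_le]
    decide

lemma pvAcc_cnt42 (a b : Nat) :
    ((pvAcc a b).filter (fun ele => ele == "r42")).length = a := by
  unfold pvAcc
  rw [List.filter_append, List.length_append]
  simp

lemma pvAcc_cnt31 (a b : Nat) :
    ((pvAcc a b).filter (fun ele => ele == "r31")).length = b := by
  unfold pvAcc
  rw [List.filter_append, List.length_append]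
  simp

lemma pvAcc_last (a b : Nat) :
    PySem.List.pyGet? (pvAcc a b) (-1)
      = if b = 0 then (if a = 0 then none else some "r42") else some "r31" := by
  rw [PySem.List.pyGet?_neg_one]
  unfold pvAcc
  rcases Nat.eq_zero_or_pos b with hb | hb
  · subst hb
    rcases Nat.eq_zero_or_pos a with ha | ha
    · subst ha; simp
    · obtain ⟨a', rfl⟩ := Nat.exists_eq_succ_of_ne_zero (Nat.pos_iff_ne_zero.mp ha)
      simp [List.replicate_succ', List.getLast?_append]
  · obtain ⟨b', rfl⟩ := Nat.exists_eq_succ_of_ne_zero (Nat.pos_iff_ne_zero.mp hb)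
    simp [List.replicate_succ', List.getLast?_append, ← List.append_assoc]

-- pvCheckA on a good accumulator matches B's final test
lemma pvCheckA_acc (a b : Nat) :
    pvCheckA (pvAcc a b) = decide (0 < (b : Int) ∧ (b : Int) < (a : Int)) := by
  unfold pvCheckA
  rw [pvAcc_sorted, pvAcc_last, pvAcc_cnt42, pvAcc_cnt31]
  rcases Nat.eq_zero_or_pos b with hb | hb
  · subst hb
    rcases Nat.eq_zero_or_pos a with ha | ha
    · subst ha; simp
    · simp [Nat.pos_iff_ne_zero.mp ha]
  · have hb' : b ≠ 0 := Nat.pos_iff_ne_zero.mp hb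
    by_cases hab : (b : Int) < (a : Int)
    · simp [hb', hab] <;> omega
    · simp [hb', hab]

-- an accumulator containing "r31" before "r42" can never pass A's sorted-equality test,
-- whatever the rest of the loop appends
lemma pvBad (m : String) (rule42 rule31 : List String) (L : Int) :
    ∀ (idxs : List Int) (pre mid post : List String),
      pvPost (pvLoopA m rule42 rule31 L idxs (pre ++ ("r31" :: (mid ++ ("r42" :: post))))) = false := by
  intro idxs
  induction idxs with
  | nil =>
      intro pre mid post
      have hsub : List.Sublist ["r31", "r42"] (pre ++ ("r31" :: (mid ++ ("r42" :: post)))) := by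
        have h1 : List.Sublist ["r31", "r42"] ("r31" :: (mid ++ ("r42" :: post))) :=
          List.Sublist.cons₂ _ ((List.Sublist.cons₂ _ (List.nil_sublist _)).trans
            (List.sublist_append_right mid _))
        exact h1.trans (List.sublist_append_right pre _)
      have hne : PySem.List.sorted (pre ++ ("r31" :: (mid ++ ("r42" :: post)))) (fun x => x) true
          ≠ (pre ++ ("r31" :: (mid ++ ("r42" :: post)))) := by
        intro heq
        have hp := PySem.List.sorted_pairwise_rev (pre ++ ("r31" :: (mid ++ ("r42" :: post)))) (fun x => x)
        rw [heq] at hp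
        have h2 := hp.sublist hsub
        rw [List.pairwise_cons] at h2
        have h42 : ("r42" : String) ≤ "r31" := h2.1 "r42" (by simp)
        rw [String.le_iff_toList_le] at h42
        revert h42
        decide
      unfold pvPost pvLoopA pvCheckA
      simp [hne]
  | cons i rest ih =>
      intro pre mid post
      unfold pvLoopA
      simp only
      split
      · have h := ih pre mid (post ++ ["r42"])
        simpa [List.append_assoc] using h
      · split
        · have h := ih pre mid (post ++ ["r31"])
          simpa [List.append_assoc] using h
        · rfl

-- main loop invariant: A's remaining loop + final check equals B's remaining loop,
-- when the accumulator so far is a r42's followed by b r31's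
lemma pvMain (m : String) (rule42 rule31 : List String) (L : Int) :
    ∀ (idxs : List Int) (a b : Nat),
      pvPost (pvLoopA m rule42 rule31 L idxs (pvAcc a b)) = pvLoopB m rule42 rule31 L idxs (a : Int) (b : Int) := by
  intro idxs
  induction idxs with
  | nil =>
      intro a b
      simpa [pvLoopA, pvLoopB, pvPost] using pvCheckA_acc a b
  | cons i rest ih =>
      intro a b
      unfold pvLoopA pvLoopB
      simp only
      split
      · -- part ∈ rule42
        by_cases hb : 0 < (b : Int)
        · have hb' : b ≠ 0 := by omega
          obtain ⟨b', rfl⟩ := Nat.exists_eq_succ_of_ne_zero hb'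
          have hsh : pvAcc a (b' + 1) ++ ["r42"]
              = List.replicate a "r42" ++ ("r31" :: (List.replicate b' "r31" ++ ("r42" :: []))) := by
            simp [pvAcc, List.replicate_succ, List.append_assoc]
          rw [hsh, pvBad, if_pos hb]
        · have hb0 : b = 0 := by omega
          subst hb0
          rw [if_neg hb]
          have : pvAcc a 0 ++ ["r42"] = pvAcc (a + 1) 0 := by
            simp [pvAcc, List.replicate_succ']
          rw [this]
          have := ih (a + 1) 0
          rw [this]
          norm_num
      · split
        · -- part ∈ rule31
          have : pvAcc a b ++ ["r31"] = pvAcc a (b + 1) := by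
            simp [pvAcc, List.replicate_succ', List.append_assoc]
          rw [this]
          have := ih a (b + 1)
          rw [this]
          norm_num
        · rfl

-- ===== VERDICT (by name: the statement is the Claim_ definition above) =====
theorem check_message_spec : Claim_equal_check_message := by
  intro m rule42 rule31 L _ _
  unfold Spec_check_message check_message check_message_alt
  have h := pvMain m rule42 rule31 L (PySem.List.pyRange 0 (PySem.Str.len m) L) 0 0
  simpa [pvPost, pvAcc] using h
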